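-- pv_equiv track=rewrite | github.com/youmean0427/Algorithm | 프로그래머스/2/17687. ［3차］ n진수 게임/［3차］ n진수 게임.py | solution
-- ===== SOURCE A (Python) =====
-- def solution(n, t, m, p):
--     alpha = {10:'A', 11:'B', 12:'C', 13:'D', 14:'E', 15:'F'}
--
--     def change(x):
--         arr = []
--         while x >= n:
--             if 9 < x % n < 16:
--                 arr.append(alpha[x%n])
--             else:
--                 arr.append(x%n)
--             x //= n
--         if 9 < x % n < 16:
--             arr.append(alpha[x])
--         else:
--             arr.append(x)
--         arr.reverse()
--         return arr
--
--     answer = ''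
--     end = t * m
--     box = []
--     for i in range(end):
--         box += change(i)
--
--     for i in range(p-1, end, m):
--         answer += str(box[i])
--
--     return answer
-- ===== SOURCE B (Python) =====
-- _DIGITS = "0123456789ABCDEF"
--
--
-- def _to_base(n, x):
--     q, r = divmod(x, n)
--     s = _DIGITS[r] if r < 16 else str(r)
--     return _to_base(n, q) + [s] if q > 0 else [s]
--
--
-- def solution(n, t, m, p):
--     end = t * m
--     buf = []
--     i = 0
--     while len(buf) < end:
--         buf += _to_base(n, i)
--         i += 1
--     return ''.join(buf[i] for i in range(p - 1, end, m))
-- ===== Notes on version B (the rewrite author's own statement) =====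
-- stated objective: alternative
-- what changed: A converts every number below t*m to base n (an append-then-reverse digit loop) and samples the oversized digit list; B converts numbers with a direct divmod recursion only until t*m digits exist and joins every m-th digit, avoiding the surplus digit generation (a log-factor of work for small bases, the same cost for large ones).
-- outside the precondition, e.g. on solution(1, 1, 1, 1): A returns '0', B returns '0'; on solution(2, 4, 1, 0): A returns '10110', B returns '00110'; on solution(2, -1, -1, 1): A returns '', B returns ''
import Mathlib
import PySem

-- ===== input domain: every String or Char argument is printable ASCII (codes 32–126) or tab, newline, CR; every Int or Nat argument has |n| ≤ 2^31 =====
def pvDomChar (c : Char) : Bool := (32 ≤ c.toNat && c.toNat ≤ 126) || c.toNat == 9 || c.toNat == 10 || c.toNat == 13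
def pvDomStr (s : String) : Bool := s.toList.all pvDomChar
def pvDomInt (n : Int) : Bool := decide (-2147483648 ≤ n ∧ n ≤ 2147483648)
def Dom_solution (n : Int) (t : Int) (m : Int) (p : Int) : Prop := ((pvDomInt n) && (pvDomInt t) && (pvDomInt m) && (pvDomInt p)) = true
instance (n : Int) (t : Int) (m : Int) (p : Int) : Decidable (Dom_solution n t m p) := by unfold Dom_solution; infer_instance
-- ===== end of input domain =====

-- B replaces A's "convert every number below t*m" pass by generating base-n digits only
-- until t*m digits exist, then sampling every m-th one; return values agree on Pre_.
-- Python lists are dynamic arrays, so the ports model them as Array String (push/extend,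
-- amortized like CPython's append/+=); both programs' digit lists hold the digits
-- pre-stringified: str() is applied where the value is appended, the same value.

-- Python list indexing xs[i] with a default (the default is unreachable inside Pre_)
def arrGetD (a : Array String) (i : Int) (d : String) : String :=
  if 0 ≤ i then a.getD i.toNat d
  else if 0 ≤ i + a.size then a.getD (i + a.size).toNat d
  else d

-- ===== PORT A =====
-- the dict literal alpha = {10:'A', …, 15:'F'}
def alphaA : PySem.Dict Int String :=
  PySem.Dict.ofList [(10, "A"), (11, "B"), (12, "C"), (13, "D"), (14, "E"), (15, "F")]

-- the while-loop of change(x); fuel x.toNat+1 bounds its iteration count on 2 ≤ n, 0 ≤ x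
-- (outside Pre_ the Python loop diverges or raises; the fuel-0 branch is never reached inside Pre_)
def changeGoA : Nat → Int → Int → Array String → Array String
  | 0, _, _, arr => arr.reverse
  | f + 1, n, x, arr =>
    if n ≤ x then
      changeGoA f n (PySem.Int.floordiv x n)
        (arr.push (if 9 < PySem.Int.mod x n ∧ PySem.Int.mod x n < 16
                   then (alphaA.get? (PySem.Int.mod x n)).getD ""
                   else PySem.Int.toStr (PySem.Int.mod x n)))
    else
      (arr.push (if 9 < PySem.Int.mod x n ∧ PySem.Int.mod x n < 16
                 then (alphaA.get? x).getD ""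
                 else PySem.Int.toStr x)).reverse

def changeA (n : Int) (x : Int) : Array String := changeGoA (x.toNat + 1) n x #[]

-- the local 'box' of A (e = end = t*m)
def boxA (n : Int) (e : Int) : Array String :=
  (PySem.List.pyRange 0 e 1).foldl (fun b i => b ++ changeA n i) #[]

def solution (n : Int) (t : Int) (m : Int) (p : Int) : String :=
  let box := boxA n (t * m)
  (PySem.List.pyRange (p - 1) (t * m) m).foldl (fun ans i => ans ++ arrGetD box i "") ""

-- ===== PORT B =====
-- the string constant _DIGITS, modelled as the list of its 1-character strings
-- (indexing a Python str yields the 1-character string)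
def bDigits : List String :=
  ["0", "1", "2", "3", "4", "5", "6", "7", "8", "9", "A", "B", "C", "D", "E", "F"]

def digitB (r : Int) : String :=
  if r < 16 then PySem.List.pyGetD bDigits r "" else PySem.Int.toStr r

-- _to_base(n, x), q/r = divmod(x, n); fuel x.toNat+1 bounds the recursion depth on 2 ≤ n, 0 ≤ x
def toBaseGo : Nat → Int → Int → List String
  | 0, _, _ => []
  | f + 1, n, x =>
    if 0 < PySem.Int.floordiv x n
    then toBaseGo f n (PySem.Int.floordiv x n) ++ [digitB (PySem.Int.mod x n)]
    else [digitB (PySem.Int.mod x n)]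

def toBasePort (n : Int) (x : Int) : List String := toBaseGo (x.toNat + 1) n x

-- the while-loop of B; it runs at most e iterations (each _to_base is nonempty), so fuel e.toNat
def bGo : Nat → Int → Int → Int → Array String → Array String
  | 0, _, _, _, buf => buf
  | f + 1, n, e, i, buf =>
    if (buf.size : Int) < e then bGo f n e (i + 1) (buf ++ (toBasePort n i).toArray) else buf

-- the local 'buf' of B after its while-loop (e = end = t*m)
def bufB (n : Int) (e : Int) : Array String := bGo e.toNat n e 0 #[]

def solution_alt (n : Int) (t : Int) (m : Int) (p : Int) : String :=
  let buf := bufB n (t * m)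
  PySem.Str.join ""
    ((PySem.List.pyRange (p - 1) (t * m) m).map (fun i => arrGetD buf i ""))

-- ===== PRECONDITION & SPEC =====
-- Pre_ excludes n ≤ 1 with 0 < t (A loops forever or raises ZeroDivisionError except on
-- degenerate inputs), m ≤ 0 (range(p-1, t*m, m) raises ValueError, or walks down and raises
-- IndexError or is empty), and p ≤ 0 (A's negative indices wrap to the END of box, which may
-- be longer than t*m — an accidental artefact of A building more digits than it samples).
def Pre_solution (n : Int) (t : Int) (m : Int) (p : Int) : Prop :=
  1 ≤ m ∧ 1 ≤ p ∧ (2 ≤ n ∨ t ≤ 0)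
instance (n : Int) (t : Int) (m : Int) (p : Int) : Decidable (Pre_solution n t m p) := by
  unfold Pre_solution; infer_instance

def pvWitness_solution : Int × Int × Int × Int := (2, 4, 2, 1)

def Spec_solution (n : Int) (t : Int) (m : Int) (p : Int) (out : String) : Prop :=
  out = solution_alt n t m p
instance (n : Int) (t : Int) (m : Int) (p : Int) (out : String) : Decidable (Spec_solution n t m p out) := by
  unfold Spec_solution; infer_instance

-- ===== CLAIM (what is proved, stated in full; the proofs are below) =====
def Claim_equal_solution : Prop :=
  ∀ (n : Int) (t : Int) (m : Int) (p : Int),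
    Dom_solution n t m p → Pre_solution n t m p → Spec_solution n t m p (solution n t m p)

-- ===== LEMMAS AND PROOFS =====

-- an in-bounds Python index into an array is a plain list lookup
lemma arrGetD_eq_getElem (a : Array String) {i : Int} (d : String)
    (h0 : 0 ≤ i) (h1 : i.toNat < a.size) :
    arrGetD a i d = a.toList[i.toNat]'(by simpa using h1) := by
  unfold arrGetD
  rw [if_pos h0, Array.getD_eq_getD_getElem?, Array.getElem?_eq_getElem h1]
  simp

-- A's per-digit value equals B's per-digit value, for a nonnegative digit
lemma digA_eq_digitB (d : Int) (hd : 0 ≤ d) :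
    (if 9 < d ∧ d < 16 then (alphaA.get? d).getD "" else PySem.Int.toStr d) = digitB d := by
  by_cases h16 : d < 16
  · interval_cases d <;> decide
  · unfold digitB
    rw [if_neg (by omega), if_neg (by omega)]

-- quotient strictly decreases
lemma floordiv_lt_self {n x : Int} (hn : 2 ≤ n) (hx : 0 ≤ x) (hq : 0 < PySem.Int.floordiv x n) :
    PySem.Int.floordiv x n < x ∧ 0 ≤ PySem.Int.floordiv x n := by
  have hb : (0:Int) < n := by omega
  have h1 : 1 * n ≤ x := (PySem.Int.le_floordiv_iff_mul_le (a := x) (q := 1) hb).mp (by omega)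
  refine ⟨(PySem.Int.floordiv_lt_iff_lt_mul hb).mpr ?_, le_of_lt hq⟩
  nlinarith

-- toBaseGo does not depend on the fuel, as long as it exceeds x
lemma toBaseGo_fuel {n : Int} (hn : 2 ≤ n) :
    ∀ f g (x : Int), 0 ≤ x → x.toNat < f → x.toNat < g → toBaseGo f n x = toBaseGo g n x := by
  intro f
  induction f with
  | zero => intro g x _ h; omega
  | succ f ih =>
    intro g x hx hf hg
    obtain ⟨g', rfl⟩ : ∃ g', g = g' + 1 := ⟨g - 1, by omega⟩
    simp only [toBaseGo]
    by_cases hq : 0 < PySem.Int.floordiv x n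
    · obtain ⟨hlt, hq0⟩ := floordiv_lt_self hn hx hq
      rw [if_pos hq, if_pos hq, ih g' _ hq0 (by omega) (by omega)]
    · rw [if_neg hq, if_neg hq]

lemma toBasePort_unfold {n x : Int} (hn : 2 ≤ n) (hx : 0 ≤ x) :
    toBasePort n x =
      if 0 < PySem.Int.floordiv x n
      then toBasePort n (PySem.Int.floordiv x n) ++ [digitB (PySem.Int.mod x n)]
      else [digitB (PySem.Int.mod x n)] := by
  unfold toBasePort
  conv_lhs => rw [toBaseGo]
  by_cases hq : 0 < PySem.Int.floordiv x n
  · obtain ⟨hlt, hq0⟩ := floordiv_lt_self hn hx hq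
    rw [if_pos hq, if_pos hq,
      toBaseGo_fuel hn x.toNat ((PySem.Int.floordiv x n).toNat + 1) _ hq0 (by omega) (by omega)]
  · rw [if_neg hq, if_neg hq]

-- A's change(x) computes exactly B's _to_base(n, x)
lemma changeGoA_eq {n : Int} (hn : 2 ≤ n) :
    ∀ f (x : Int) (arr : Array String), 0 ≤ x → x.toNat < f →
      (changeGoA f n x arr).toList = toBasePort n x ++ arr.toList.reverse := by
  intro f
  induction f with
  | zero => intro x arr _ h; omega
  | succ f ih =>
    intro x arr hx hf
    have hb : (0:Int) < n := by omega
    have hm0 : 0 ≤ PySem.Int.mod x n := PySem.Int.mod_nonneg x hb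
    simp only [changeGoA]
    by_cases hnx : n ≤ x
    · have hq : 0 < PySem.Int.floordiv x n :=
        lt_of_lt_of_le zero_lt_one
          ((PySem.Int.le_floordiv_iff_mul_le (a := x) (q := 1) hb).mpr (by omega))
      obtain ⟨hlt, hq0⟩ := floordiv_lt_self hn hx hq
      have hfu : (PySem.Int.floordiv x n).toNat < f := by omega
      have hih := ih (PySem.Int.floordiv x n)
        (arr.push (if 9 < PySem.Int.mod x n ∧ PySem.Int.mod x n < 16
                   then (alphaA.get? (PySem.Int.mod x n)).getD ""
                   else PySem.Int.toStr (PySem.Int.mod x n)))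
        hq0 hfu
      rw [if_pos hnx, hih, toBasePort_unfold hn hx, if_pos hq, digA_eq_digitB _ hm0]
      simp
    · -- x < n: the quotient is 0 and x % n = x
      have hq : ¬ 0 < PySem.Int.floordiv x n := by
        intro hq
        have := (PySem.Int.le_floordiv_iff_mul_le (a := x) (q := 1) hb).mp (by omega)
        omega
      have hmod : PySem.Int.mod x n = x := by
        rw [PySem.Int.mod_eq_emod_of_pos hb]
        exact Int.emod_eq_of_lt hx (by omega)
      rw [if_neg hnx, toBasePort_unfold hn hx, if_neg hq, hmod, digA_eq_digitB _ hx]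
      simp

lemma changeA_eq {n x : Int} (hn : 2 ≤ n) (hx : 0 ≤ x) :
    (changeA n x).toList = toBasePort n x := by
  simpa [changeA] using changeGoA_eq hn (x.toNat + 1) x #[] hx (by omega)

-- every _to_base result is nonempty
lemma toBasePort_ne_nil (n x : Int) : 1 ≤ (toBasePort n x).length := by
  unfold toBasePort toBaseGo
  split_ifs <;> simp

-- the concatenation of the first k digit blocks
def flatD (n : Int) (k : Int) : List String :=
  (PySem.List.pyRange 0 k 1).flatMap (toBasePort n)

lemma flatD_succ {n k : Int} (hk : 0 ≤ k) :
    flatD n (k + 1) = flatD n k ++ toBasePort n k := by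
  unfold flatD
  rw [PySem.List.pyRange_one_succ_right hk, List.flatMap_append]
  simp

lemma flatD_mono {n j k : Int} (hj : 0 ≤ j) (hjk : j ≤ k) :
    ∃ rest, flatD n k = flatD n j ++ rest := by
  refine ⟨(PySem.List.pyRange j k 1).flatMap (toBasePort n), ?_⟩
  unfold flatD
  rw [PySem.List.pyRange_one_append 0 j k hj hjk, List.flatMap_append]

-- the invariant of B's while-loop
lemma bGo_spec {n e : Int} :
    ∀ f (i : Int) (buf : Array String), 0 ≤ i → i ≤ e → buf.toList = flatD n i →
      i.toNat ≤ buf.size → e.toNat ≤ buf.size + f →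
      ∃ j, 0 ≤ j ∧ j ≤ e ∧ (bGo f n e i buf).toList = flatD n j ∧
        e.toNat ≤ (flatD n j).length := by
  intro f
  induction f with
  | zero =>
    intro i buf hi hie hbuf hlen hfuel
    refine ⟨i, hi, hie, hbuf, ?_⟩
    have hsz : buf.size = (flatD n i).length := by rw [← Array.length_toList, hbuf]
    omega
  | succ f ih =>
    intro i buf hi hie hbuf hlen hfuel
    simp only [bGo]
    by_cases hc : ((buf.size : Int)) < e
    · rw [if_pos hc]
      have hne := toBasePort_ne_nil n i
      have hbuf' : (buf ++ (toBasePort n i).toArray).toList = flatD n (i + 1) := by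
        rw [Array.toList_append, List.toList_toArray, hbuf, flatD_succ hi]
      have hsize : (buf ++ (toBasePort n i).toArray).size = buf.size + (toBasePort n i).length := by
        simp
      exact ih (i + 1) _ (by omega) (by omega) hbuf' (by omega) (by omega)
    · rw [if_neg hc]
      refine ⟨i, hi, hie, hbuf, ?_⟩
      have hsz : buf.size = (flatD n i).length := by rw [← Array.length_toList, hbuf]
      omega

-- a fold that extends an array by blocks concatenates the blocks
lemma foldl_array_append (l : List Int) (g : Int → Array String) (acc : Array String) :
    (l.foldl (fun b i => b ++ g i) acc).toList
      = acc.toList ++ l.flatMap (fun i => (g i).toList) := by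
  induction l generalizing acc with
  | nil => simp
  | cons x xs ih => simp [ih, Array.toList_append]

-- A's box is the concatenation of all t*m digit blocks
lemma box_eq {n e : Int} (hn : 2 ≤ n) : (boxA n e).toList = flatD n e := by
  unfold boxA
  rw [foldl_array_append]
  unfold flatD
  simp only [List.nil_append]
  exact List.flatMap_congr fun x hx =>
    changeA_eq hn (PySem.List.mem_pyRange_one.mp hx).1

-- a string-building fold is the join of the mapped pieces
lemma join_nil_cons (p : List Char) (rest : List (List Char)) :
    PySem.Chars.join [] (p :: rest) = p ++ PySem.Chars.join [] rest := by
  cases rest with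
  | nil => simp [PySem.Chars.join_singleton, PySem.Chars.join_nil]
  | cons q r => rw [PySem.Chars.join_cons_cons]; simp

lemma strfold_eq_join (l : List Int) (g : Int → String) :
    l.foldl (fun ans i => ans ++ g i) "" = PySem.Str.join "" (l.map g) := by
  apply String.toList_inj.mp
  rw [PySem.Str.toList_join]
  have key : ∀ (l : List Int) (s : String),
      (l.foldl (fun ans i => ans ++ g i) s).toList
        = s.toList ++ PySem.Chars.join [] ((l.map g).map String.toList) := by
    intro l
    induction l with
    | nil => intro s; simp [PySem.Chars.join_nil]
    | cons x xs ih =>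
      intro s
      simp only [List.foldl_cons, List.map_cons, ih, String.toList_append, join_nil_cons]
      simp
  have := key l ""
  simpa using this

-- ===== VERDICT (by name: the statement is the Claim_ definition above) =====
theorem solution_spec : Claim_equal_solution := by
  intro n t m p _ hpre
  obtain ⟨hm, hp, hnt⟩ := hpre
  unfold Spec_solution solution solution_alt
  simp only []
  rw [strfold_eq_join]
  set e := t * m with he
  by_cases hepos : 0 < e
  · have hn : 2 ≤ n := by
      rcases hnt with hn | ht
      · exact hn
      · have h1 : t * m ≤ 0 := mul_nonpos_of_nonpos_of_nonneg ht (by omega)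
        omega
    have h0 : (#[] : Array String).toList = flatD n 0 := by
      unfold flatD; rw [PySem.List.pyRange_one_eq_nil le_rfl]; rfl
    obtain ⟨j, hj0, hje, hbuf, hjlen⟩ :=
      bGo_spec (n := n) (e := e) e.toNat 0 #[] le_rfl (by omega) h0 (by simp) (by simp)
    congr 1
    apply List.map_congr_left
    intro i hi
    obtain ⟨h1, h2, -⟩ := (PySem.List.mem_pyRange_iff_of_pos (by omega) i).mp hi
    have hi0 : 0 ≤ i := by omega
    obtain ⟨rest, hrest⟩ := flatD_mono (n := n) hj0 hje
    have hblen : (boxA n e).toList = flatD n e := box_eq hn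
    have hboxsize : (boxA n e).size = (flatD n e).length := by
      rw [← Array.length_toList, hblen]
    have hbufsize : (bufB n e).size = (flatD n j).length := by
      rw [← Array.length_toList]; unfold bufB; rw [hbuf]
    have hilt : i.toNat < (flatD n j).length := by omega
    have hiltE : i.toNat < (flatD n e).length := by
      rw [hrest, List.length_append]; omega
    rw [arrGetD_eq_getElem _ _ hi0 (by omega),
        arrGetD_eq_getElem _ _ hi0 (by omega)]
    have hb : (bufB n e).toList = flatD n j := by unfold bufB; rw [hbuf]
    rw [List.getElem_of_eq hblen, List.getElem_of_eq hb, List.getElem_of_eq hrest]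
    exact List.getElem_append_left hilt
  · -- e ≤ 0: both loops build the empty array
    have he0 : e.toNat = 0 := by omega
    have hbox : boxA n e = #[] := by
      unfold boxA
      rw [PySem.List.pyRange_one_eq_nil (by omega), List.foldl_nil]
    have hbuf : bufB n e = #[] := by unfold bufB; rw [he0]; rfl
    rw [hbox, hbuf]
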